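-- pv_equiv track=rewrite | github.com/dhruvbaid/AdventOfCode2021 | Day 17/Day 17.py | maxHeight
-- ===== SOURCE A (Python) =====
-- def step(x, y, xVel, yVel):
--     x += xVel
--     y += yVel
--
--     # Drag
--     if xVel > 0:
--         xVel -= 1
--     elif xVel < 0:
--         xVel += 1
--     else:
--         pass
--
--     # Gravity
--     yVel -= 1
--
--     # Final position and velocity
--     return x, y, xVel, yVel
--
-- def maxHeight(xVel, yVel, xMin, xMax, yMin, yMax):
--     if yVel <= 0:
--         return 0
--     x, y, xVel, yVel = 0, 0, xVel, yVel
--     yMax = 0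
--     while True:
--         x, y, xVel, yVel = step(x, y, xVel, yVel)
--         if y > yMax:
--             yMax = y
--         if yVel <= 0:
--             break
--     return yMax
-- ===== SOURCE B (Python) =====
-- def maxHeight(xVel, yVel, xMin, xMax, yMin, yMax):
--     # Closed form: heights climb by yVel, yVel-1, ..., 1, so the peak is the
--     # triangular number yVel*(yVel+1)//2 when yVel > 0, else 0.
--     return yVel * (yVel + 1) // 2 if yVel > 0 else 0
-- ===== Notes on version B (the rewrite author's own statement) =====
-- stated objective: faster
-- what changed: Replaces the step-by-step flight simulation loop with the closed-form triangular number yVel*(yVel+1)//2 for yVel>0 (0 otherwise).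
import Mathlib
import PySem

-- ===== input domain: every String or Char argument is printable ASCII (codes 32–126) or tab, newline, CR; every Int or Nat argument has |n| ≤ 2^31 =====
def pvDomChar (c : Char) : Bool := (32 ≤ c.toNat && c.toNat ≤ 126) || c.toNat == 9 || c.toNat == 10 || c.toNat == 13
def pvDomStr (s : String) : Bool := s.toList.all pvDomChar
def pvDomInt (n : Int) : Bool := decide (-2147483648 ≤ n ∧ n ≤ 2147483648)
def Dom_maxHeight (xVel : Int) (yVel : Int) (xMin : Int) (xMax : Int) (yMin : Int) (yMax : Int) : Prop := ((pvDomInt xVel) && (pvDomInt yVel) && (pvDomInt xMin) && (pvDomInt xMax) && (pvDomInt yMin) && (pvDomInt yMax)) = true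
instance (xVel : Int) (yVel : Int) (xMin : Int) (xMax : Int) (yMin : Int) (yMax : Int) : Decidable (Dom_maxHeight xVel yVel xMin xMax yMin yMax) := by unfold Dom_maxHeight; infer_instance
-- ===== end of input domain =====

-- B replaces A's step-by-step flight simulation with the closed-form triangular number (faster).

-- ===== PORT A =====
-- step(x, y, xVel, yVel)
def stepA (x y xVel yVel : Int) : Int × Int × Int × Int :=
  let x := x + xVel
  let y := y + yVel
  let xVel := if xVel > 0 then xVel - 1 else if xVel < 0 then xVel + 1 else xVel
  let yVel := yVel - 1
  (x, y, xVel, yVel)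

-- the 'while True' loop of maxHeight (state: x, y, xVel, yVel, yMax)
def loopA (x y xVel yVel yMax : Int) : Int :=
  match h : stepA x y xVel yVel with
  | (x', y', xVel', yVel') =>
    let yMax' := if y' > yMax then y' else yMax
    if h2 : yVel' ≤ 0 then yMax'
    else loopA x' y' xVel' yVel' yMax'
termination_by yVel.toNat
decreasing_by simp only [stepA, Prod.mk.injEq] at h; omega

def maxHeight (xVel : Int) (yVel : Int) (xMin : Int) (xMax : Int) (yMin : Int) (yMax : Int) : Int :=
  if yVel ≤ 0 then 0
  else loopA 0 0 xVel yVel 0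

-- ===== PORT B =====
def maxHeight_alt (xVel : Int) (yVel : Int) (xMin : Int) (xMax : Int) (yMin : Int) (yMax : Int) : Int :=
  if yVel > 0 then PySem.Int.floordiv (yVel * (yVel + 1)) 2 else 0

-- ===== PRECONDITION & SPEC =====
def Spec_maxHeight (xVel : Int) (yVel : Int) (xMin : Int) (xMax : Int) (yMin : Int) (yMax : Int) (out : Int) : Prop := out = maxHeight_alt xVel yVel xMin xMax yMin yMax
instance (xVel : Int) (yVel : Int) (xMin : Int) (xMax : Int) (yMin : Int) (yMax : Int) (out : Int) : Decidable (Spec_maxHeight xVel yVel xMin xMax yMin yMax out) := by unfold Spec_maxHeight; infer_instance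

-- ===== CLAIM (what is proved, stated in full; the proofs are below) =====
def Claim_equal_maxHeight : Prop := ∀ (xVel : Int) (yVel : Int) (xMin : Int) (xMax : Int) (yMin : Int) (yMax : Int), Dom_maxHeight xVel yVel xMin xMax yMin yMax → Spec_maxHeight xVel yVel xMin xMax yMin yMax (maxHeight xVel yVel xMin xMax yMin yMax)

-- ===== LEMMAS AND PROOFS =====

-- triangular numbers, recursively
def triI : Nat → Int
  | 0 => 0
  | n + 1 => triI n + (n + 1)

theorem triI_nonneg (n : Nat) : 0 ≤ triI n := by
  induction n with
  | zero => simp [triI]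
  | succ k ih => simp only [triI]; push_cast; omega

theorem two_mul_triI (n : Nat) : (n : Int) * (n + 1) = 2 * triI n := by
  induction n with
  | zero => simp [triI]
  | succ k ih => simp only [triI]; push_cast at *; ring_nf at *; omega

theorem loopA_eq (n : Nat) : ∀ (x y xVel yMax : Int),
    loopA x y xVel ((n : Int) + 1) yMax = max yMax (y + triI (n + 1)) := by
  induction n with
  | zero =>
    intro x y xVel yMax
    rw [loopA.eq_def]
    simp only [stepA, triI]
    norm_num
    split_ifs <;> omega
  | succ k ih =>
    intro x y xVel yMax
    rw [loopA.eq_def]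
    simp only [stepA]
    push_cast
    have hne : ¬ ((k : Int) + 1 + 1 - 1 ≤ 0) := by push_cast; omega
    rw [dif_neg hne]
    have harg : ((k : Int) + 1 + 1 - 1) = ((k : Int) + 1) := by ring
    rw [harg, ih]
    have h1 := triI_nonneg (k + 1)
    have h2 : triI (k + 1 + 1) = triI (k + 1) + ((k : Int) + 1 + 1) := by
      simp only [triI]; push_cast; ring
    rw [h2]
    split_ifs <;> omega

theorem maxHeight_spec : Claim_equal_maxHeight := by
  intro xVel yVel xMin xMax yMin yMax _
  unfold Spec_maxHeight maxHeight maxHeight_alt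
  by_cases h : yVel ≤ 0
  · rw [if_pos h, if_neg (by omega)]
  · rw [if_neg h, if_pos (by omega)]
    obtain ⟨n, hn⟩ : ∃ n : Nat, yVel = (n : Int) + 1 :=
      ⟨(yVel - 1).toNat, by omega⟩
    subst hn
    rw [loopA_eq]
    have h1 := triI_nonneg (n + 1)
    have h2 : ((n : Int) + 1) * ((n : Int) + 1 + 1) = 2 * triI (n + 1) := by
      have := two_mul_triI (n + 1); push_cast at this; omega
    rw [PySem.Int.floordiv_eq_ediv_of_pos (by norm_num), h2,
      Int.mul_ediv_cancel_left _ (by norm_num)]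
    omega
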